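-- pv_equiv track=rewrite | github.com/coleoguy/tealc | agent/hypothesis_pipeline.py | _compose_signs
-- ===== SOURCE A (Python) =====
-- def _compose_signs(signs: list[str]) -> str:
--     """Multiply a sequence of '+' / '-' / '0' along a path. Any '0' makes the result '0'."""
--     result = "+"
--     for s in signs:
--         if s == "0":
--             return "0"
--         if s == "-":
--             result = "-" if result == "+" else "+"
--         # '+' is identity
--     return result
-- ===== SOURCE B (Python) =====
-- def _compose_signs(signs: list[str]) -> str:
--     """Multiply a sequence of '+' / '-' / '0' along a path. Any '0' makes the result '0'."""
--     if "0" in signs: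
--         return "0"
--     return "-" if signs.count("-") % 2 else "+"
-- ===== Notes on version B (the rewrite author's own statement) =====
-- stated objective: simpler
-- what changed: Replaced the stateful sign-toggling loop (with mid-loop early return) by a membership test for '0' followed by a parity check of the count of '-'.
import Mathlib
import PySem

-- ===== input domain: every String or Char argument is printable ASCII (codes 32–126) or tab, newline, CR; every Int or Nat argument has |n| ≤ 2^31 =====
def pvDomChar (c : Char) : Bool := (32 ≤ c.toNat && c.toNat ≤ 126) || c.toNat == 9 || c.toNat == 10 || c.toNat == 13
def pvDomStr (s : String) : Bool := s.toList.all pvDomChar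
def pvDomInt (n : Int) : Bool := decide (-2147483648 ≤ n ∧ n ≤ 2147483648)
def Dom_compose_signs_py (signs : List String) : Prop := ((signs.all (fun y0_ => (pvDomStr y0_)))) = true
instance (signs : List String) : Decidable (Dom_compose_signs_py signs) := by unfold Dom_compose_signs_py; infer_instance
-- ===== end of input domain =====

-- ===== PORT A =====
-- B changes the structure: membership test + parity count instead of A's toggling accumulator loop.
def composeSignsGo (result : String) : List String → String
  | [] => result
  | s :: rest =>
    if s = "0" then "0"
    else if s = "-" then composeSignsGo (if result = "+" then "-" else "+") rest
    else composeSignsGo result rest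

def compose_signs_py (signs : List String) : String := composeSignsGo "+" signs

-- ===== PORT B =====
def compose_signs_py_alt (signs : List String) : String :=
  if signs.contains "0" then "0"
  else if PySem.List.count signs "-" % 2 = 1 then "-" else "+"

-- ===== PRECONDITION & SPEC =====
def Spec_compose_signs_py (signs : List String) (out : String) : Prop := out = compose_signs_py_alt signs
instance (signs : List String) (out : String) : Decidable (Spec_compose_signs_py signs out) := by unfold Spec_compose_signs_py; infer_instance

-- ===== CLAIM (what is proved, stated in full; the proofs are below) =====
def Claim_equal_compose_signs_py : Prop := ∀ (signs : List String), Dom_compose_signs_py signs → Spec_compose_signs_py signs (compose_signs_py signs)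

-- ===== LEMMAS AND PROOFS =====

-- ===== VERDICT (by name: the statement is the Claim_ definition above) =====
lemma composeSignsGo_eq (signs : List String) : ∀ r : String, r = "+" ∨ r = "-" →
    composeSignsGo r signs =
      if signs.contains "0" then "0"
      else if (signs.count "-" + (if r = "-" then 1 else 0)) % 2 = 1 then "-" else "+" := by
  induction signs with
  | nil =>
    intro r hr
    rcases hr with h | h <;> subst h <;> simp [composeSignsGo]
  | cons s rest ih =>
    intro r hr
    by_cases h0 : s = "0"
    · subst h0; simp [composeSignsGo]
    · by_cases hm : s = "-"
      · subst hm
        rcases hr with h | h <;> subst h <;>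
          simp [composeSignsGo, ih, h0, Ne.symm h0, Nat.add_mod] <;>
            split <;> first | rfl | exact if_congr (by omega) rfl rfl
      · rcases hr with h | h <;> subst h <;>
          simp [composeSignsGo, hm, h0, ih, Ne.symm h0]

theorem compose_signs_py_spec : Claim_equal_compose_signs_py := by
  intro signs _
  unfold Spec_compose_signs_py compose_signs_py compose_signs_py_alt
  rw [composeSignsGo_eq signs "+" (Or.inl rfl)]
  by_cases h : "0" ∈ signs <;> simp [h, PySem.List.count_eq]
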